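-- pv_equiv track=rewrite | github.com/0bserver07/bourbaki | backend/bourbaki/autonomous/formalizer.py | extract_final_step
-- ===== SOURCE A (Python) =====
-- def extract_final_step(code: str) -> str | None:
--     """Extract the final closing tactic from skeleton code.
--
--     The final step is the last non-sorry, non-have line in the proof body.
--     Returns None if not found or if it's just sorry/exact?.
--     """
--     lines = code.strip().split("\n")
--     for line in reversed(lines):
--         stripped = line.strip()
--         if not stripped:
--             continue
--         # Skip if it's a have/sorry line or comment
--         if "have " in stripped and "sorry" in stripped:
--             continue
--         if stripped.startswith("--"):
--             continue
--         if stripped in ("sorry", "exact?"):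
--             return None
--         if stripped.startswith(":= by"):
--             continue
--         return stripped
--     return None
-- ===== SOURCE B (Python) =====
-- def extract_final_step(code: str) -> str | None:
--     """Forward single pass: keep the last line that is not skipped, then decide."""
--     candidate = None
--     for line in code.strip().split("\n"):
--         s = line.strip()
--         if s and not ("have " in s and "sorry" in s) and not s.startswith("--") and not s.startswith(":= by"):
--             candidate = s
--     if candidate in ("sorry", "exact?"):
--         return None
--     return candidate
-- ===== Notes on version B (the rewrite author's own statement) =====
-- stated objective: alternative
-- what changed: Replaces the reverse scan with early returns by a single forward pass that accumulates the last non-skipped stripped line in a candidate variable and decides sorry/exact? once after the loop.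
import Mathlib
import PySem

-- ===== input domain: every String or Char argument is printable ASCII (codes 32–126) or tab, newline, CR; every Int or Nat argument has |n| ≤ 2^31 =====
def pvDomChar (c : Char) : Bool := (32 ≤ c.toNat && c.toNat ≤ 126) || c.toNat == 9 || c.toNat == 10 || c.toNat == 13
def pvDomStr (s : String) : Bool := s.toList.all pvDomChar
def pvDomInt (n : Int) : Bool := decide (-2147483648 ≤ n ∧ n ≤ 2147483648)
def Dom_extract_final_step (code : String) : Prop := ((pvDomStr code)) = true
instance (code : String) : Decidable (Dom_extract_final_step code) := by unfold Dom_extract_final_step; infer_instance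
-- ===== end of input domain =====

-- B replaces A's reverse scan with early returns by a forward accumulate-then-decide pass (alternative decomposition, same cost).

-- ===== PORT A =====
-- A's `for line in reversed(lines)` loop with its early returns, as structural recursion
def aLoop : List String → Option String
  | [] => none
  | line :: rest =>
    let stripped := PySem.Str.strip line
    if stripped == "" then aLoop rest
    else if PySem.Str.isIn "have " stripped && PySem.Str.isIn "sorry" stripped then aLoop rest
    else if PySem.Str.startswith stripped "--" then aLoop rest
    else if stripped == "sorry" || stripped == "exact?" then none
    else if PySem.Str.startswith stripped ":= by" then aLoop rest
    else some stripped

def extract_final_step (code : String) : Option String :=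
  aLoop (((PySem.Chars.splitOn (PySem.Str.strip code).toList ['\n']).map String.ofList).reverse)

-- ===== PORT B =====
-- the (negated) skip condition of Source B's loop body
def bSkip (s : String) : Bool :=
  s == "" || (PySem.Str.isIn "have " s && PySem.Str.isIn "sorry" s)
    || PySem.Str.startswith s "--" || PySem.Str.startswith s ":= by"

-- one iteration of Source B's forward loop: update the candidate
def bStep (c : Option String) (line : String) : Option String :=
  let s := PySem.Str.strip line
  if bSkip s then c else some s

-- Source B's final decision on the accumulated candidate
def bFin : Option String → Option String
  | none => none
  | some s => if s == "sorry" || s == "exact?" then none else some s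

def extract_final_step_alt (code : String) : Option String :=
  bFin (((PySem.Chars.splitOn (PySem.Str.strip code).toList ['\n']).map String.ofList).foldl bStep none)

-- ===== PRECONDITION & SPEC =====
def Spec_extract_final_step (code : String) (out : Option String) : Prop := out = extract_final_step_alt code
instance (code : String) (out : Option String) : Decidable (Spec_extract_final_step code out) := by unfold Spec_extract_final_step; infer_instance

-- ===== CLAIM (what is proved, stated in full; the proofs are below) =====
def Claim_equal_extract_final_step : Prop := ∀ (code : String), Dom_extract_final_step code → Spec_extract_final_step code (extract_final_step code)

-- ===== LEMMAS AND PROOFS =====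

theorem aLoop_reverse_eq (l : List String) :
    aLoop l.reverse = bFin (l.foldl bStep none) := by
  induction l using List.reverseRecOn with
  | nil => rfl
  | append_singleton xs a ih =>
    rw [List.reverse_append, List.foldl_append]
    simp only [List.reverse_cons, List.reverse_nil, List.nil_append, List.foldl_cons,
      List.foldl_nil, List.singleton_append]
    rw [aLoop]
    simp only [bStep, bSkip]
    by_cases h1 : (PySem.Str.strip a == "") = true
    · simp only [h1, Bool.true_or, if_true, ih]
    · rw [Bool.not_eq_true] at h1
      by_cases h2 : (PySem.Str.isIn "have " (PySem.Str.strip a) &&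
          PySem.Str.isIn "sorry" (PySem.Str.strip a)) = true
      · simp only [h1, h2, Bool.false_or, Bool.true_or, if_true,
          Bool.false_eq_true, if_false, ih]
      · rw [Bool.not_eq_true] at h2
        by_cases h3 : PySem.Str.startswith (PySem.Str.strip a) "--" = true
        · simp only [h1, h2, h3, Bool.false_or, Bool.true_or, if_true,
            Bool.false_eq_true, if_false, ih]
        · rw [Bool.not_eq_true] at h3
          by_cases h4 : (PySem.Str.strip a == "sorry" || PySem.Str.strip a == "exact?") = true
          · have h5 : PySem.Str.startswith (PySem.Str.strip a) ":= by" = false := by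
              rcases Bool.or_eq_true_iff.mp h4 with h | h
              · rw [beq_iff_eq.mp h]; decide
              · rw [beq_iff_eq.mp h]; decide
            simp only [h1, h2, h3, h4, h5, Bool.or_false,
              Bool.false_eq_true, if_false, if_true, bFin]
          · rw [Bool.not_eq_true] at h4
            by_cases h5 : PySem.Str.startswith (PySem.Str.strip a) ":= by" = true
            · simp only [h1, h2, h3, h4, h5, Bool.false_or, Bool.or_true,
                Bool.false_eq_true, if_false, if_true, ih]
            · rw [Bool.not_eq_true] at h5
              simp only [h1, h2, h3, h4, h5, Bool.or_false,
                Bool.false_eq_true, if_false, bFin]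

-- ===== VERDICT (by name: the statement is the Claim_ definition above) =====
theorem extract_final_step_spec : Claim_equal_extract_final_step := by
  intro code _
  unfold Spec_extract_final_step extract_final_step extract_final_step_alt
  exact aLoop_reverse_eq _
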